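-- pv_equiv track=rewrite | github.com/TrendyBananaYT/raiden_shogun | bot/cogs/military.py | calculate_military_capacity
-- ===== SOURCE A (Python) =====
-- from typing import Dict, List, Optional
--
-- def calculate_military_capacity(cities: List[Dict]) -> Dict[str, int]:
--     """Calculate total military capacity from cities and research."""
--     capacity = {
--         "soldiers": 0,
--         "tanks": 0,
--         "aircraft": 0,
--         "ships": 0
--     }
--
--     # Calculate from cities
--     for city in cities:
--         capacity["soldiers"] += city.get("barracks", 0) * 3000
--         capacity["tanks"] += city.get("factory", 0) * 250
--         capacity["aircraft"] += city.get("hangar", 0) * 15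
--         capacity["ships"] += city.get("drydock", 0) * 5
--
--     return capacity
-- ===== SOURCE B (Python) =====
-- def calculate_military_capacity(cities):
--     """Calculate total military capacity from cities and research."""
--     return {
--         "soldiers": sum(city.get("barracks", 0) for city in cities) * 3000,
--         "tanks": sum(city.get("factory", 0) for city in cities) * 250,
--         "aircraft": sum(city.get("hangar", 0) for city in cities) * 15,
--         "ships": sum(city.get("drydock", 0) for city in cities) * 5,
--     }
-- ===== Notes on version B (the rewrite author's own statement) =====
-- stated objective: simpler
-- what changed: Replaces the single mutable-dict accumulating loop with a direct dict literal built from four independent sums over cities, each multiplied by its weight once at the end.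
import Mathlib
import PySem

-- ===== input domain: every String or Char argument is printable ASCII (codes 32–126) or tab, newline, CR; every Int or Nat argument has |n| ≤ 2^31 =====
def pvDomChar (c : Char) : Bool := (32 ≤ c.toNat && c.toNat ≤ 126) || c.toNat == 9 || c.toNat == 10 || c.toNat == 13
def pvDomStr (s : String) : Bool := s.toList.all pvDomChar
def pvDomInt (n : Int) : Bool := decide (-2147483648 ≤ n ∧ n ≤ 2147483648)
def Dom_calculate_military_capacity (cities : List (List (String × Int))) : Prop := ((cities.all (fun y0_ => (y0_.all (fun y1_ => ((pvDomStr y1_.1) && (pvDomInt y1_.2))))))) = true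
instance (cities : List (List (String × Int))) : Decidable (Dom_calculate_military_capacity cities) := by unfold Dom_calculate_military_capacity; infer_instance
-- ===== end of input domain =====

-- B builds the result dict from four independent sums instead of A's single accumulating loop (objective: simpler).

-- shared helper: Python's city.get(k, 0) on a dict passed as an association list (first match)
def cityGet (city : List (String × Int)) (k : String) : Int :=
  (PySem.Dict.mk city).getD k 0

-- ===== PORT A =====
def calculate_military_capacity (cities : List (List (String × Int))) : List (String × Int) :=
  (cities.foldl (fun cap city =>
      let cap := cap.insert "soldiers" (cap.getD "soldiers" 0 + cityGet city "barracks" * 3000)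
      let cap := cap.insert "tanks" (cap.getD "tanks" 0 + cityGet city "factory" * 250)
      let cap := cap.insert "aircraft" (cap.getD "aircraft" 0 + cityGet city "hangar" * 15)
      cap.insert "ships" (cap.getD "ships" 0 + cityGet city "drydock" * 5))
    (PySem.Dict.ofList [("soldiers", 0), ("tanks", 0), ("aircraft", 0), ("ships", 0)])).items

-- ===== PORT B =====
def calculate_military_capacity_alt (cities : List (List (String × Int))) : List (String × Int) :=
  [("soldiers", (cities.map (fun city => cityGet city "barracks")).sum * 3000),
   ("tanks",    (cities.map (fun city => cityGet city "factory")).sum * 250),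
   ("aircraft", (cities.map (fun city => cityGet city "hangar")).sum * 15),
   ("ships",    (cities.map (fun city => cityGet city "drydock")).sum * 5)]

-- ===== PRECONDITION & SPEC =====
def Spec_calculate_military_capacity (cities : List (List (String × Int))) (out : List (String × Int)) : Prop := out = calculate_military_capacity_alt cities
instance (cities : List (List (String × Int))) (out : List (String × Int)) : Decidable (Spec_calculate_military_capacity cities out) := by unfold Spec_calculate_military_capacity; infer_instance

-- ===== CLAIM (what is proved, stated in full; the proofs are below) =====
def Claim_equal_calculate_military_capacity : Prop := ∀ (cities : List (List (String × Int))), Dom_calculate_military_capacity cities → Spec_calculate_military_capacity cities (calculate_military_capacity cities)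

-- ===== LEMMAS AND PROOFS =====

-- one loop step keeps the accumulator in the four-key shape and adds the weighted counts
theorem cap_step (a b c e : Int) (city : List (String × Int)) :
    (let cap := PySem.Dict.mk [("soldiers", a), ("tanks", b), ("aircraft", c), ("ships", e)]
     let cap := cap.insert "soldiers" (cap.getD "soldiers" 0 + cityGet city "barracks" * 3000)
     let cap := cap.insert "tanks" (cap.getD "tanks" 0 + cityGet city "factory" * 250)
     let cap := cap.insert "aircraft" (cap.getD "aircraft" 0 + cityGet city "hangar" * 15)
     cap.insert "ships" (cap.getD "ships" 0 + cityGet city "drydock" * 5)) =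
    PySem.Dict.mk [("soldiers", a + cityGet city "barracks" * 3000),
                   ("tanks", b + cityGet city "factory" * 250),
                   ("aircraft", c + cityGet city "hangar" * 15),
                   ("ships", e + cityGet city "drydock" * 5)] := by
  rfl

theorem cap_fold (cities : List (List (String × Int))) : ∀ (a b c e : Int),
    cities.foldl (fun cap city =>
      let cap := cap.insert "soldiers" (cap.getD "soldiers" 0 + cityGet city "barracks" * 3000)
      let cap := cap.insert "tanks" (cap.getD "tanks" 0 + cityGet city "factory" * 250)
      let cap := cap.insert "aircraft" (cap.getD "aircraft" 0 + cityGet city "hangar" * 15)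
      cap.insert "ships" (cap.getD "ships" 0 + cityGet city "drydock" * 5))
      (PySem.Dict.mk [("soldiers", a), ("tanks", b), ("aircraft", c), ("ships", e)]) =
    PySem.Dict.mk [("soldiers", a + (cities.map (fun city => cityGet city "barracks")).sum * 3000),
                   ("tanks", b + (cities.map (fun city => cityGet city "factory")).sum * 250),
                   ("aircraft", c + (cities.map (fun city => cityGet city "hangar")).sum * 15),
                   ("ships", e + (cities.map (fun city => cityGet city "drydock")).sum * 5)] := by
  induction cities with
  | nil => intro a b c e; simp
  | cons city rest ih =>
      intro a b c e
      rw [List.foldl_cons, cap_step, ih]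
      simp [List.map_cons, List.sum_cons]
      refine ⟨by ring, by ring, by ring, by ring⟩

-- ===== VERDICT (by name: the statement is the Claim_ definition above) =====
theorem calculate_military_capacity_spec : Claim_equal_calculate_military_capacity := by
  intro cities _
  unfold Spec_calculate_military_capacity calculate_military_capacity calculate_military_capacity_alt
  show (cities.foldl _ (PySem.Dict.mk [("soldiers", 0), ("tanks", 0), ("aircraft", 0), ("ships", 0)])).items = _
  rw [cap_fold]
  simp
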